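-- pv_equiv track=rewrite | github.com/hanbikan/algorithm-problem | Python/투에-모스 문자열.py | f
-- ===== SOURCE A (Python) =====
-- def f(k):
--     mul = 1
--     while mul * 2 < k:
--         mul *= 2
--
--     count = 0
--     while k >= 1:
--         if k % mul != k:
--             k %= mul
--             count += 1
--         mul //= 2
--
--     return count % 2
-- ===== SOURCE B (Python) =====
-- def f(k):
--     count = 0
--     while k >= 1:
--         count += k % 2
--         k //= 2
--     return count % 2
-- ===== Notes on version B (the rewrite author's own statement) =====
-- stated objective: simpler
-- what changed: Replaces A's two loops (first find the largest power of two mul with mul*2 < k, then strip the highest set bit each step via k %= mul while halving mul) with a single low-to-high bit scan that sums k % 2 while flooring k by 2, returning the sum mod 2.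
import Mathlib
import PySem

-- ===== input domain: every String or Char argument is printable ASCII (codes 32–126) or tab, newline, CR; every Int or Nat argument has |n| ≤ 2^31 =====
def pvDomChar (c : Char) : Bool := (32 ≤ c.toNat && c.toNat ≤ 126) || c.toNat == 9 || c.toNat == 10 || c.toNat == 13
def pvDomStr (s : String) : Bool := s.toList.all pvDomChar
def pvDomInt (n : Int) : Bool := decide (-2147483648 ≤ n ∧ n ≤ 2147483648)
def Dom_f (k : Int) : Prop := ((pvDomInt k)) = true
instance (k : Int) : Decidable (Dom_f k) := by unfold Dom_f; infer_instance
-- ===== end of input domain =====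

-- B replaces A's two-loop top-bit stripping with one low-to-high bit scan; objective: simpler.

-- ===== PORT A =====
-- while mul * 2 < k: mul *= 2
-- (the '0 < mul' conjunct is a pure totality guard: Python diverges for mul ≤ 0 here,
--  and f only calls this with mul = 1, so the guard is unreachable from f)
def pvLoop1 (k mul : Int) : Int :=
  if 0 < mul ∧ mul * 2 < k then pvLoop1 k (mul * 2) else mul
termination_by (k - mul).toNat
decreasing_by omega

-- while k >= 1: if k % mul != k: k %= mul; count += 1; mul //= 2
-- (the '1 ≤ mul' test is a ZeroDivisionError totality guard: Python raises on k % 0;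
--  mul ≤ 0 with 1 ≤ k is unreachable from f, which starts from pvLoop1's power of two)
def pvLoop2 (k mul count : Int) : Int :=
  if 1 ≤ k then
    if 1 ≤ mul then
      if PySem.Int.mod k mul ≠ k then
        pvLoop2 (PySem.Int.mod k mul) (PySem.Int.floordiv mul 2) (count + 1)
      else
        pvLoop2 k (PySem.Int.floordiv mul 2) count
    else PySem.Int.mod count 2
  else PySem.Int.mod count 2
termination_by mul.toNat
decreasing_by
  all_goals
    rename_i hm _
    rw [PySem.Int.floordiv_eq_ediv_of_pos (by omega : (0:Int) < 2)]
    omega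

def f (k : Int) : Int :=
  pvLoop2 k (pvLoop1 k 1) 0

-- ===== PORT B =====
-- while k >= 1: count += k % 2; k //= 2
def pvBLoop (k count : Int) : Int :=
  if 1 ≤ k then
    pvBLoop (PySem.Int.floordiv k 2) (count + PySem.Int.mod k 2)
  else PySem.Int.mod count 2
termination_by k.toNat
decreasing_by
  rename_i hk
  rw [PySem.Int.floordiv_eq_ediv_of_pos (by omega : (0:Int) < 2)]
  omega

def f_alt (k : Int) : Int :=
  pvBLoop k 0

-- ===== PRECONDITION & SPEC =====
def Spec_f (k : Int) (out : Int) : Prop := out = f_alt k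
instance (k : Int) (out : Int) : Decidable (Spec_f k out) := by unfold Spec_f; infer_instance

-- ===== CLAIM (what is proved, stated in full; the proofs are below) =====
def Claim_equal_f : Prop := ∀ (k : Int), Dom_f k → Spec_f k (f k)

-- ===== LEMMAS AND PROOFS =====

-- Both loops compute the parity of the bit count; we relate each to PySem.Int.bitCount.

theorem pvBLoop_eq (k count : Int) (hk : 0 ≤ k) :
    pvBLoop k count = PySem.Int.mod (count + (PySem.Int.bitCount k : Int)) 2 := by
  induction k, count using pvBLoop.induct with
  | case1 k count h ih =>
    rw [pvBLoop, if_pos h]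
    rw [ih (by rw [PySem.Int.floordiv_eq_ediv_of_pos (by omega : (0:Int) < 2)]; omega)]
    rw [PySem.Int.bitCount_of_pos (by omega : 0 < k)]
    have h2 := PySem.Int.mod_eq_emod_of_pos (a := k) (show (0:Int) < 2 by omega)
    have h3 := PySem.Int.mod_eq_emod_of_pos
      (a := count + PySem.Int.mod k 2 + (PySem.Int.bitCount (PySem.Int.floordiv k 2) : Int))
      (show (0:Int) < 2 by omega)
    have h4 := PySem.Int.mod_eq_emod_of_pos
      (a := count + (((PySem.Int.mod k 2).toNat + PySem.Int.bitCount (PySem.Int.floordiv k 2) : Nat) : Int))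
      (show (0:Int) < 2 by omega)
    rw [h3, h4]
    have h5 : (0:Int) ≤ PySem.Int.mod k 2 := PySem.Int.mod_nonneg k (by omega)
    push_cast
    rw [Int.toNat_of_nonneg h5]
    ring_nf
  | case2 k count h =>
    have hk0 : k = 0 := by omega
    subst hk0
    rw [pvBLoop, if_neg h]
    simp [PySem.Int.bitCount_zero]

-- splitting off the top bit: bitCount (2^e + r) = 1 + bitCount r for 0 ≤ r < 2^e
theorem bitCount_pow_add (e : Nat) : ∀ r : Int, 0 ≤ r → r < 2 ^ e →
    PySem.Int.bitCount (2 ^ e + r) = 1 + PySem.Int.bitCount r := by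
  induction e with
  | zero =>
    intro r h0 h1
    have : r = 0 := by omega
    subst this
    decide
  | succ e ih =>
    intro r h0 h1
    have hpe : (0:Int) < 2 ^ e := by positivity
    have hx : (0:Int) < 2 ^ (e + 1) + r := by omega
    rw [PySem.Int.bitCount_of_pos hx]
    rw [PySem.Int.mod_eq_emod_of_pos (show (0:Int) < 2 by omega),
        PySem.Int.floordiv_eq_ediv_of_pos (show (0:Int) < 2 by omega)]
    have hsplit : (2:Int) ^ (e + 1) + r = r + 2 * 2 ^ e := by ring
    rw [hsplit]
    rw [Int.add_mul_emod_self_left, Int.add_mul_ediv_left r (2 ^ e) (by omega : (2:Int) ≠ 0)]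
    have hr2 : r / 2 < 2 ^ e := by omega
    have hr2' : (0:Int) ≤ r / 2 := by omega
    have := ih (r / 2) hr2' hr2
    rw [add_comm (r / 2) ((2:Int) ^ e), this]
    by_cases hr : r = 0
    · subst hr; decide
    · rw [PySem.Int.bitCount_of_pos (by omega : 0 < r),
          PySem.Int.mod_eq_emod_of_pos (show (0:Int) < 2 by omega),
          PySem.Int.floordiv_eq_ediv_of_pos (show (0:Int) < 2 by omega)]
      omega

theorem pvLoop2_eq (e : Nat) : ∀ k count : Int, 0 ≤ k → k ≤ 2 * 2 ^ e →
    pvLoop2 k (2 ^ e) count = PySem.Int.mod (count + (PySem.Int.bitCount k : Int)) 2 := by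
  induction e with
  | zero =>
    intro k count h0 h2
    simp only [pow_zero] at h2 ⊢
    by_cases hk : 1 ≤ k
    · have hmod : PySem.Int.mod k 1 = 0 := by
        rw [PySem.Int.mod_eq_emod_of_pos (by omega : (0:Int) < 1)]; omega
      rw [pvLoop2, if_pos hk, if_pos (by omega : (1:Int) ≤ 1),
          if_pos (by rw [hmod]; omega), hmod,
          (by decide : PySem.Int.floordiv 1 2 = 0), pvLoop2, if_neg (by omega)]
      have hbc : PySem.Int.bitCount k = 1 := by interval_cases k <;> decide
      rw [hbc,
          PySem.Int.mod_eq_emod_of_pos (show (0:Int) < 2 by omega),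
          PySem.Int.mod_eq_emod_of_pos (show (0:Int) < 2 by omega)]
      norm_num
    · have : k = 0 := by omega
      subst this
      rw [pvLoop2, if_neg hk]
      simp [PySem.Int.bitCount_zero]
  | succ e ih =>
    intro k count h0 h2
    have hpe : (0:Int) < 2 ^ e := by positivity
    have hmulpos : (0:Int) < 2 ^ (e + 1) := by positivity
    have hhalf : PySem.Int.floordiv ((2:Int) ^ (e + 1)) 2 = 2 ^ e := by
      rw [PySem.Int.floordiv_eq_ediv_of_pos (by omega : (0:Int) < 2), pow_succ,
          Int.mul_ediv_cancel _ (by omega : (2:Int) ≠ 0)]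
    by_cases hk : 1 ≤ k
    · rw [pvLoop2, if_pos hk, if_pos (by omega : (1:Int) ≤ 2 ^ (e + 1))]
      by_cases hlt : k < 2 ^ (e + 1)
      · -- top bit absent: k % mul = k, halve mul
        have hmod : PySem.Int.mod k (2 ^ (e + 1)) = k := by
          rw [PySem.Int.mod_eq_emod_of_pos hmulpos]
          exact Int.emod_eq_of_lt h0 hlt
        rw [if_neg (show ¬(PySem.Int.mod k (2 ^ (e + 1)) ≠ k) by rw [hmod]; omega), hhalf]
        exact ih k count h0 (by rw [pow_succ] at hlt; omega)
      · -- top bit present: k % mul = k - mul (or 0 when k = 2*mul), count it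
        push Not at hlt
        have hle2 : k ≤ 2 * 2 ^ (e + 1) := by rw [pow_succ] at h2 ⊢; omega
        by_cases htop : k = 2 * 2 ^ (e + 1)
        · have hmod : PySem.Int.mod k (2 ^ (e + 1)) = 0 := by
            rw [PySem.Int.mod_eq_emod_of_pos hmulpos, htop, mul_comm, Int.mul_emod_right]
          rw [if_pos (show PySem.Int.mod k (2 ^ (e + 1)) ≠ k by rw [hmod]; omega), hmod, hhalf]
          rw [ih 0 (count + 1) (by omega) (by omega)]
          have hbk : PySem.Int.bitCount k = 1 := by
            have h1 : k = 2 ^ (e + 2) + 0 := by rw [htop]; ring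
            rw [h1, bitCount_pow_add (e + 2) 0 (by omega) (by positivity),
                PySem.Int.bitCount_zero]
          rw [hbk, PySem.Int.bitCount_zero]
          rw [PySem.Int.mod_eq_emod_of_pos (show (0:Int) < 2 by omega),
              PySem.Int.mod_eq_emod_of_pos (show (0:Int) < 2 by omega)]
          norm_num
        · have hlt2 : k < 2 * 2 ^ (e + 1) := by omega
          have hmod : PySem.Int.mod k (2 ^ (e + 1)) = k - 2 ^ (e + 1) := by
            rw [PySem.Int.mod_eq_emod_of_pos hmulpos, ← Int.sub_emod_right k (2 ^ (e + 1)),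
                Int.emod_eq_of_lt (by omega) (by omega)]
          rw [if_pos (show PySem.Int.mod k (2 ^ (e + 1)) ≠ k by rw [hmod]; omega), hmod, hhalf]
          rw [ih (k - 2 ^ (e + 1)) (count + 1) (by omega) (by omega)]
          have hbk : PySem.Int.bitCount k = 1 + PySem.Int.bitCount (k - 2 ^ (e + 1)) := by
            have h1 := bitCount_pow_add (e + 1) (k - 2 ^ (e + 1)) (by omega) (by omega)
            rw [show (2:Int) ^ (e + 1) + (k - 2 ^ (e + 1)) = k by ring] at h1
            exact h1
          rw [hbk]
          rw [PySem.Int.mod_eq_emod_of_pos (show (0:Int) < 2 by omega),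
              PySem.Int.mod_eq_emod_of_pos (show (0:Int) < 2 by omega)]
          push_cast
          ring_nf
    · have : k = 0 := by omega
      subst this
      rw [pvLoop2, if_neg hk]
      simp [PySem.Int.bitCount_zero]

theorem pvLoop1_pow (k : Int) : ∀ mul : Int, 0 < mul →
    ∃ e : Nat, pvLoop1 k mul = mul * 2 ^ e ∧ k ≤ 2 * (mul * 2 ^ e) := by
  intro mul hm
  induction mul using pvLoop1.induct (k := k) with
  | case1 mul h ih =>
    obtain ⟨e, he1, he2⟩ := ih (by omega)
    refine ⟨e + 1, ?_, ?_⟩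
    · rw [pvLoop1, if_pos h, he1]; ring
    · calc k ≤ 2 * (mul * 2 * 2 ^ e) := he2
        _ = 2 * (mul * 2 ^ (e + 1)) := by ring
  | case2 mul h =>
    refine ⟨0, ?_, ?_⟩
    · rw [pvLoop1, if_neg h]; ring
    · push Not at h
      have := h hm
      simp only [pow_zero, mul_one]
      omega

-- ===== VERDICT (by name: the statement is the Claim_ definition above) =====
theorem f_spec : Claim_equal_f := by
  intro k _
  unfold Spec_f f f_alt
  by_cases hk : 0 ≤ k
  · obtain ⟨e, he1, he2⟩ := pvLoop1_pow k 1 (by omega)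
    rw [one_mul] at he1 he2
    rw [he1, pvLoop2_eq e k 0 hk he2, pvBLoop_eq k 0 hk]
  · -- negative k: both loops exit immediately
    have h1 : pvLoop1 k 1 = 1 := by
      rw [pvLoop1, if_neg (by push Not; intro; omega)]
    rw [h1, pvLoop2, if_neg (by omega), pvBLoop, if_neg (by omega)]
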